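-- pv_equiv track=rewrite | github.com/comp110-25s/comp110-workspace-akinguy | exercises/ex03/dictionary.py | bins_len
-- ===== SOURCE A (Python) =====
-- def bins_len(input_list: list[str]) -> dict[int, set[str]]:
--     """Bins a list of str into a dict where key is the length of str's and value is a set of str's"""
--     result = {}
--     idx = 0
--     while idx < len(input_list):
--         length = len(input_list[idx])
--         if length not in result:
--             result[length] = []
--         if input_list[idx] not in result[length]:
--             result[length].append(input_list[idx])
--         idx += 1
--     return result
-- ===== SOURCE B (Python) =====
-- def bins_len(input_list: list[str]) -> dict[int, list[str]]:
--     """Bins a list of str into a dict keyed by length; two passes: group everything, then dedup each bucket."""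
--     groups = {}
--     for s in input_list:
--         groups.setdefault(len(s), []).append(s)
--     return {k: list(dict.fromkeys(v)) for k, v in groups.items()}
-- ===== Notes on version B (the rewrite author's own statement) =====
-- stated objective: faster
-- what changed: A's interleaved single pass with a per-element list membership test is replaced by two passes: group every string into its length bucket unconditionally, then deduplicate each bucket once with dict.fromkeys.
import Mathlib
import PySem

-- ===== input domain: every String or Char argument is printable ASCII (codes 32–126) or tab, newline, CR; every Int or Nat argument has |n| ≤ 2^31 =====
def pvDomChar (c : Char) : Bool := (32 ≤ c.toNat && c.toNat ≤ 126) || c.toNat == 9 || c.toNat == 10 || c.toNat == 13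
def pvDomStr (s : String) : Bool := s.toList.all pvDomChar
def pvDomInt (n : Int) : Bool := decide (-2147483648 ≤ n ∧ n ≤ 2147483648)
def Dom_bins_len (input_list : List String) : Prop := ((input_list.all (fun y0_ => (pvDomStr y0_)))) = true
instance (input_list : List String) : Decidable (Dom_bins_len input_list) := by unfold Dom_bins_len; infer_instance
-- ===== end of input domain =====

-- B groups every string into its length bucket in one unconditional pass, then deduplicates
-- each bucket once (dict.fromkeys), instead of A's interleaved membership-checked single pass.

-- ===== PORT A =====
-- body of A's while loop (idx scans the list left to right, so the loop is a fold)
def binsStepA (result : PySem.Dict Int (List String)) (s : String) : PySem.Dict Int (List String) :=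
  let length : Int := PySem.Str.len s
  let result := if result.contains length then result else result.insert length []
  if s ∈ result.getD length [] then result else result.modify length [] (· ++ [s])

def bins_len (input_list : List String) : List (Int × List String) :=
  (input_list.foldl binsStepA PySem.Dict.empty).items

-- ===== PORT B =====
-- groups.setdefault(len(s), []).append(s)
def binsStepB (groups : PySem.Dict Int (List String)) (s : String) : PySem.Dict Int (List String) :=
  groups.modify (PySem.Str.len s) [] (· ++ [s])

def bins_len_alt (input_list : List String) : List (Int × List String) :=
  let groups := input_list.foldl binsStepB PySem.Dict.empty
  groups.items.map (fun p => (p.1, PySem.List.dedup p.2))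

-- ===== PRECONDITION & SPEC =====
def Spec_bins_len (input_list : List String) (out : List (Int × List String)) : Prop := out = bins_len_alt input_list
instance (input_list : List String) (out : List (Int × List String)) : Decidable (Spec_bins_len input_list out) := by unfold Spec_bins_len; infer_instance

-- ===== CLAIM (what is proved, stated in full; the proofs are below) =====
def Claim_equal_bins_len : Prop := ∀ (input_list : List String), Dom_bins_len input_list → Spec_bins_len input_list (bins_len input_list)

-- ===== LEMMAS AND PROOFS =====

-- F maps a raw-buckets dict to its per-bucket-deduplicated image
def binsF (d : PySem.Dict Int (List String)) : PySem.Dict Int (List String) :=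
  PySem.Dict.mk (d.items.map (fun p => (p.1, PySem.List.dedup p.2)))

theorem binsF_keys (d : PySem.Dict Int (List String)) : (binsF d).keys = d.keys := by
  simp [binsF, PySem.Dict.keys]

theorem binsF_contains (d : PySem.Dict Int (List String)) (k : Int) :
    (binsF d).contains k = d.contains k := by
  simp [PySem.Dict.contains, binsF, List.any_map, Function.comp_def]

theorem binsF_get? (d : PySem.Dict Int (List String)) (k : Int) :
    (binsF d).get? k = (d.get? k).map PySem.List.dedup := by
  simp [PySem.Dict.get?, binsF, List.find?_map, Function.comp_def]

theorem binsF_getD (d : PySem.Dict Int (List String)) (k : Int) :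
    (binsF d).getD k [] = PySem.List.dedup (d.getD k []) := by
  simp [PySem.Dict.getD, binsF_get?]
  cases d.get? k <;> simp [PySem.List.dedup]

theorem binsF_insert (d : PySem.Dict Int (List String)) (k : Int) (w : List String) :
    binsF (d.insert k w) = (binsF d).insert k (PySem.List.dedup w) := by
  unfold PySem.Dict.insert
  rw [binsF_contains]
  split
  · apply PySem.Dict.ext
    simp only [binsF, List.map_map]
    apply List.map_congr_left
    intro p _
    by_cases h : p.1 = k <;> simp [h]
  · apply PySem.Dict.ext
    simp [binsF]

theorem insert_getD_self_dict (d : PySem.Dict Int (List String)) (k : Int) (dflt : List String)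
    (hnd : d.keys.Nodup) (hc : d.contains k = true) : d.insert k (d.getD k dflt) = d := by
  apply PySem.Dict.ext
  rw [PySem.Dict.items_insert_of_contains _ _ hc]
  conv_rhs => rw [← List.map_id d.items]
  apply List.map_congr_left
  intro p hp
  simp only [id]
  by_cases h : (p.1 == k) = true
  · have hk : p.1 = k := by simpa using h
    have hv : d.getD k dflt = p.2 :=
      PySem.Dict.getD_of_mem_items d (by rw [← hk]; exact hp) hnd dflt
    rw [if_pos h, hv, ← hk]
  · rw [if_neg h]

theorem binsStepA_F (d : PySem.Dict Int (List String)) (s : String) (hnd : d.keys.Nodup) :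
    binsStepA (binsF d) s = binsF (binsStepB d s) := by
  simp only [binsStepA, binsStepB, PySem.Dict.modify]
  rw [binsF_contains]
  by_cases hc : d.contains (PySem.Str.len s) = true
  · rw [if_pos hc, binsF_getD]
    by_cases hm : s ∈ d.getD (PySem.Str.len s) []
    · rw [if_pos (by simpa [PySem.List.mem_dedup] using hm), binsF_insert,
        PySem.List.dedup_eq_ofList, PySem.Set.ofList_append_singleton,
        PySem.Set.add_of_mem (by simpa [PySem.Set.mem_ofList] using hm),
        ← PySem.List.dedup_eq_ofList, ← binsF_getD]
      exact (insert_getD_self_dict _ _ _ (by rw [binsF_keys]; exact hnd)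
        (by rw [binsF_contains]; exact hc)).symm
    · rw [if_neg (by simpa [PySem.List.mem_dedup] using hm), binsF_insert]
      congr 1
      rw [PySem.List.dedup_eq_ofList]
      rw [PySem.List.dedup_eq_ofList, PySem.Set.ofList_append_singleton,
        PySem.Set.add_of_not_mem (by simpa [PySem.Set.mem_ofList] using hm)]
  · rw [if_neg hc, PySem.Dict.getD_insert_self]
    rw [if_neg (List.not_mem_nil)]
    rw [PySem.Dict.insert_insert_self,
      PySem.Dict.getD_of_not_contains d [] (by simpa using hc), binsF_insert]
    simp [PySem.List.dedup, PySem.Set.ofList, PySem.Set.add, PySem.Set.empty, PySem.Set.contains]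

theorem binsStepB_nodup (d : PySem.Dict Int (List String)) (s : String) (hnd : d.keys.Nodup) :
    (binsStepB d s).keys.Nodup := by
  unfold binsStepB PySem.Dict.modify
  exact PySem.Dict.nodup_keys_insert _ _ _ hnd

theorem bins_foldl_F (l : List String) (d : PySem.Dict Int (List String)) (hnd : d.keys.Nodup) :
    l.foldl binsStepA (binsF d) = binsF (l.foldl binsStepB d) := by
  induction l generalizing d with
  | nil => simp
  | cons x xs ih =>
    simp only [List.foldl_cons]
    rw [binsStepA_F d x hnd]
    exact ih _ (binsStepB_nodup d x hnd)

-- ===== VERDICT (by name: the statement is the Claim_ definition above) =====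
theorem bins_len_spec : Claim_equal_bins_len := by
  intro input_list _
  unfold Spec_bins_len bins_len bins_len_alt
  have h0 : (PySem.Dict.empty : PySem.Dict Int (List String)) = binsF PySem.Dict.empty := by
    apply PySem.Dict.ext; simp [binsF, PySem.Dict.empty]
  rw [h0, bins_foldl_F _ _ (by simp [PySem.Dict.empty, PySem.Dict.keys])]
  rfl
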